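-- pv_equiv track=rewrite | github.com/olszewskimichal/python | 8Kyu.py | stringy
-- ===== SOURCE A (Python) =====
-- def stringy(size):
--     result = ""
--     for i in range(size):
--         if i%2==0:
--             result+="1"
--         else:
--             result+="0"
--     return result
-- ===== SOURCE B (Python) =====
-- def stringy(size):
--     return ("10" * ((size + 1) // 2))[:size]
-- ===== Notes on version B (the rewrite author's own statement) =====
-- stated objective: faster
-- what changed: Replaces the per-index loop with its parity branch and repeated string concatenation by repeating the two-character unit once and truncating with a slice to the requested length.
import Mathlib
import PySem

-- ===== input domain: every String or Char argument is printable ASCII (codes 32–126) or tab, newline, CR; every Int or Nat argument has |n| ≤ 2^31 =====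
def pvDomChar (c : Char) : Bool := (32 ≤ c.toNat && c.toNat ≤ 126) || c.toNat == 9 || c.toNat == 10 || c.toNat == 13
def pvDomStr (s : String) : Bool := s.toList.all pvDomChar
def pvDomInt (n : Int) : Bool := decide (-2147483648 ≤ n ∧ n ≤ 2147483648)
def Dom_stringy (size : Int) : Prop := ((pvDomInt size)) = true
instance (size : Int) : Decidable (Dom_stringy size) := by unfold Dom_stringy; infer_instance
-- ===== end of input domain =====

-- B builds the string by repeating the unit "10" and truncating with a slice (idiomatic, no per-index parity branch); A loops over range(size) appending '1'/'0' by parity.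

-- ===== PORT A =====
-- result accumulated as a List Char (Lean's String.append is kernel-opaque), wrapped by String.ofList at the end
def stringy (size : Int) : String :=
  String.ofList
    ((PySem.List.pyRange 0 size 1).foldl
      (fun result i => result ++ (if PySem.Int.mod i 2 == 0 then ['1'] else ['0'])) [])

-- ===== PORT B =====
-- "10" * reps is the flatten of reps copies of ['1','0']; [:size] is PySem.List.slice
def stringy_alt (size : Int) : String :=
  String.ofList
    (PySem.List.slice
      ((List.replicate (PySem.Int.floordiv (size + 1) 2).toNat ['1', '0']).flatten)
      none (some size))

-- ===== PRECONDITION & SPEC =====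
def Spec_stringy (size : Int) (out : String) : Prop := out = stringy_alt size
instance (size : Int) (out : String) : Decidable (Spec_stringy size out) := by unfold Spec_stringy; infer_instance

-- ===== CLAIM (what is proved, stated in full; the proofs are below) =====
def Claim_equal_stringy : Prop := ∀ (size : Int), Dom_stringy size → Spec_stringy size (stringy size)

-- ===== LEMMAS AND PROOFS =====

def pvBit (k : Nat) : Char := if k % 2 == 0 then '1' else '0'

-- B's repeated unit, unfolded: 2*m alternating characters
theorem pv_flatten_replicate (m : Nat) :
    (List.replicate m ['1', '0']).flatten = (List.range (2 * m)).map pvBit := by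
  induction m with
  | zero => simp
  | succ m ih =>
      have h2 : 2 * (m + 1) = 2 + 2 * m := by omega
      rw [List.replicate_succ, List.flatten_cons, ih, h2, List.range_add, List.map_append]
      simp [pvBit, Nat.add_mod_left, List.range_succ_eq_map]

-- A's loop, characterised: it maps pvBit over range n
theorem pv_loop_eq_map (n : Nat) :
    ((PySem.List.pyRange 0 (n : Int) 1).foldl
      (fun result i => result ++ (if PySem.Int.mod i 2 == 0 then ['1'] else ['0'])) [])
    = (List.range n).map pvBit := by
  have h : ∀ i : Int, (fun result i => result ++ (if PySem.Int.mod i 2 == 0 then ['1'] else ['0']))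
      = (fun (result : List Char) i => result ++ [if PySem.Int.mod i 2 == 0 then '1' else '0']) := by
    intro _; funext r i; split <;> rfl
  rw [h 0, PySem.List.foldl_append_singleton_eq_map, PySem.List.pyRange_zero_nat, List.map_map,
      List.nil_append]
  apply List.map_congr_left
  intro k _
  have hdvd : (2 ∣ (k : Int)) ↔ k % 2 = 0 := by omega
  simp [Function.comp, pvBit, hdvd]

-- ===== VERDICT (by name: the statement is the Claim_ definition above) =====
theorem stringy_spec : Claim_equal_stringy := by
  intro size _
  unfold Spec_stringy stringy stringy_alt
  by_cases hs : size ≤ 0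
  · -- empty on both sides
    rw [PySem.List.pyRange_one_eq_nil hs]
    have hreps : (PySem.Int.floordiv (size + 1) 2).toNat = 0 := by
      rw [PySem.Int.floordiv_eq_ediv_of_pos (by omega)]
      omega
    rw [hreps]
    simp [PySem.List.slice]
  · -- size = ↑n, n > 0
    rw [not_le] at hs
    obtain ⟨n, rfl⟩ : ∃ n : Nat, size = (n : Int) := ⟨size.toNat, (Int.toNat_of_nonneg hs.le).symm⟩
    have hreps : (PySem.Int.floordiv ((n : Int) + 1) 2).toNat = (n + 1) / 2 := by
      rw [PySem.Int.floordiv_eq_ediv_of_pos (by omega)]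
      omega
    rw [pv_loop_eq_map, hreps, pv_flatten_replicate, PySem.List.slice_to_natCast,
        ← List.map_take, List.take_range]
    congr 2
    have hmin : min n (2 * ((n + 1) / 2)) = n := by omega
    rw [hmin]
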